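-- pv_equiv track=rewrite | github.com/whonore/Coqtail | autoload/coqtail.py | _find_dot_after
-- ===== SOURCE A (Python) =====
-- def _find_dot_after(lines, sline, scol):
--     # type: (Sequence[str], int, int) -> Optional[Tuple[int, int]]
--     """Find the next '.' after a given point."""
--     max_line = len(lines)
--
--     while sline < max_line:
--         line = lines[sline][scol:]
--         dot_pos = line.find('.')
--         com_pos = line.find('(*')
--         str_pos = line.find('"')
--
--         if com_pos == -1 and dot_pos == -1 and str_pos == -1:
--             # Nothing on this line
--             sline += 1
--             scol = 0
--         elif dot_pos == -1 or (0 <= com_pos < dot_pos) or (0 <= str_pos < dot_pos):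
--             if str_pos == -1 or (0 <= com_pos < str_pos):
--                 # We see a comment opening before the next '.'
--                 com_end = _skip_comment(lines, sline, scol + com_pos + 2)
--                 if com_end is None:
--                     return None
--
--                 sline, scol = com_end
--             else:
--                 # We see a string starting before the next '.'
--                 str_end = _skip_str(lines, sline, scol + str_pos + 1)
--                 if str_end is None:
--                     return None
--
--                 sline, scol = str_end
--         elif line[dot_pos:dot_pos + 2] in ('.', '. '):
--             # Don't stop for '.' used in qualified name or for '..'
--             return (sline, scol + dot_pos)
--         elif line[dot_pos:dot_pos + 3] == '...':
--             # But do allow '...'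
--             return (sline, scol + dot_pos + 2)
--         else:
--             scol += dot_pos + 1
--
--     return None
--
-- def _skip_str(lines, sline, scol):
--     # type: (Sequence[str], int, int) -> Optional[Tuple[int, int]]
--     """Skip the next block contained in " "."""
--     return _skip_block(lines, sline, scol, '"')
--
-- def _skip_comment(lines, sline, scol):
--     # type: (Sequence[str], int, int) -> Optional[Tuple[int, int]]
--     """Skip the next block contained in (* *)."""
--     return _skip_block(lines, sline, scol, '*)', '(*')
--
-- def _skip_block(lines, sline, scol, estr, sstr=None):
--     # type: (Sequence[str], int, int, str, Optional[str]) -> Optional[Tuple[int, int]]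
--     """A generic function to skip the next block contained in sstr estr."""
--     nesting = 1
--     max_line = len(lines)
--
--     while nesting > 0:
--         if sline >= max_line:
--             return None
--
--         line = lines[sline][scol:]
--         blk_end = line.find(estr)
--         if sstr is not None:
--             blk_start = line.find(sstr)
--         else:
--             blk_start = -1
--
--         if blk_end != -1 and (blk_end < blk_start or blk_start == -1):
--             # Found an end and no new start
--             scol += blk_end + len(estr)
--             nesting -= 1
--         elif blk_start != -1:
--             # Found a new start
--             # N.B. mypy complains that 'sstr' might be None, but it won't be if
--             # 'blk_start' != -1
--             assert sstr is not None
--             scol += blk_start + len(sstr)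
--             nesting += 1
--         else:
--             # Nothing on this line
--             sline += 1
--             scol = 0
--
--     return (sline, scol)
-- ===== SOURCE B (Python) =====
-- def _scan_line(line, lnum, col, depth, in_str):
--     # type: (str, int, int, int, bool) -> tuple
--     """Scan one line from 'col' with an explicit mode (in_str / comment depth
--     / code).  Returns ('dot', (lnum, col)) when a statement-terminating '.'
--     is found, else ('state', depth, in_str) at end of line."""
--     n = len(line)
--     i = col
--     while i < n:
--         c = line[i]
--         if in_str:
--             if c == '"':
--                 in_str = False
--             i += 1
--         elif depth > 0:
--             if c == '(' and i + 1 < n and line[i + 1] == '*':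
--                 depth += 1
--                 i += 2
--             elif c == '*' and i + 1 < n and line[i + 1] == ')':
--                 depth -= 1
--                 i += 2
--             else:
--                 i += 1
--         elif c == '(' and i + 1 < n and line[i + 1] == '*':
--             depth = 1
--             i += 2
--         elif c == '"':
--             in_str = True
--             i += 1
--         elif c == '.':
--             if i + 1 >= n or line[i + 1] == ' ':
--                 return ('dot', (lnum, i))
--             if line[i + 1] == '.' and i + 2 < n and line[i + 2] == '.':
--                 return ('dot', (lnum, i + 2))
--             i += 1
--         else:
--             i += 1
--     return ('state', depth, in_str)
--
--
-- def _find_dot_after(lines, sline, scol):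
--     # type: (Sequence[str], int, int) -> Optional[Tuple[int, int]]
--     """Find the next '.' after a given point.
--
--     Single linear character scan: each character of the buffer is looked at
--     once, with no slicing and no repeated find() calls.
--     """
--     depth = 0
--     in_str = False
--     l, i = sline, scol
--     while l < len(lines):
--         r = _scan_line(lines[l], l, i, depth, in_str)
--         if r[0] == 'dot':
--             return r[1]
--         depth, in_str = r[1], r[2]
--         l += 1
--         i = 0
--     return None
-- ===== Notes on version B (the rewrite author's own statement) =====
-- stated objective: alternative
-- what changed: A repeatedly slices the current line and re-runs find('.')/find('(*')/find('"') (plus a separate _skip_block helper) after every jump; B makes a single left-to-right character scan over the buffer with an explicit mode (code / comment-nesting depth / inside-string), looking at each character once and never slicing.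
-- outside the precondition, e.g. on _find_dot_after(['a.', 'b.'], 0, -1): A returns (0, -1), B returns (0, 1)
import Mathlib
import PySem

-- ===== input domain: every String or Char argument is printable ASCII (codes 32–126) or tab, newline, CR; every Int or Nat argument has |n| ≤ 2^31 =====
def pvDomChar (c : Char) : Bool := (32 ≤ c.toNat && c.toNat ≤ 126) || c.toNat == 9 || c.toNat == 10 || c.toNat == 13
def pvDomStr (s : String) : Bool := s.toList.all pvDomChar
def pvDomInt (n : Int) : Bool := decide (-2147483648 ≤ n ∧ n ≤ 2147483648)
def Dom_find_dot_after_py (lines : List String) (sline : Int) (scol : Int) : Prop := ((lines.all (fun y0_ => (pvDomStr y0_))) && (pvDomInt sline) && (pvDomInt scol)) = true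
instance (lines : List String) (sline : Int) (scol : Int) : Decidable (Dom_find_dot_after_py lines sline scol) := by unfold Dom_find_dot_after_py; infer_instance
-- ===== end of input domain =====

-- B replaces A's repeated slice-and-find passes by a single linear character scan
-- with an explicit mode (code / comment depth / string); return values are identical.

-- ===== PORT A =====

-- fuel: a totality guard only; it strictly exceeds the number of loop iterations
-- A can perform (each iteration consumes a character or a line).
def pvFuel (lines : List String) : Nat := (lines.map String.length).sum + lines.length + 1

-- literal port of _skip_block
def pvSkipBlockA (lines : List String) (estr : List Char) (sstr : Option (List Char)) :
    Nat → Int → Int → Int → Option (Int × Int)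
  | 0, _, _, _ => none
  | fuel+1, nesting, sline, scol =>
    if nesting > 0 then
      if sline ≥ (lines.length : Int) then none
      else
        let line := PySem.List.slice ((PySem.List.pyGet? lines sline).getD "").toList (some scol) none
        let blkEnd := PySem.Chars.find line estr
        let blkStart := match sstr with
          | some p => PySem.Chars.find line p
          | none => (-1 : Int)
        if blkEnd ≠ -1 ∧ (blkEnd < blkStart ∨ blkStart = -1) then
          pvSkipBlockA lines estr sstr fuel (nesting - 1) sline (scol + blkEnd + (estr.length : Int))
        else if blkStart ≠ -1 then
          pvSkipBlockA lines estr sstr fuel (nesting + 1) sline (scol + blkStart + (((sstr.getD []).length : Nat) : Int))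
        else
          pvSkipBlockA lines estr sstr fuel nesting (sline + 1) 0
    else some (sline, scol)

-- literal port of the main while loop of _find_dot_after
def pvFindDotA (lines : List String) : Nat → Int → Int → Option (Int × Int)
  | 0, _, _ => none
  | fuel+1, sline, scol =>
    if sline < (lines.length : Int) then
      let line := PySem.List.slice ((PySem.List.pyGet? lines sline).getD "").toList (some scol) none
      let dotPos := PySem.Chars.find line ['.']
      let comPos := PySem.Chars.find line ['(', '*']
      let strPos := PySem.Chars.find line ['"']
      if comPos = -1 ∧ dotPos = -1 ∧ strPos = -1 then
        pvFindDotA lines fuel (sline + 1) 0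
      else if dotPos = -1 ∨ (0 ≤ comPos ∧ comPos < dotPos) ∨ (0 ≤ strPos ∧ strPos < dotPos) then
        if strPos = -1 ∨ (0 ≤ comPos ∧ comPos < strPos) then
          match pvSkipBlockA lines ['*', ')'] (some ['(', '*']) (pvFuel lines) 1 sline (scol + comPos + 2) with
          | none => none
          | some (s', c') => pvFindDotA lines fuel s' c'
        else
          match pvSkipBlockA lines ['"'] none (pvFuel lines) 1 sline (scol + strPos + 1) with
          | none => none
          | some (s', c') => pvFindDotA lines fuel s' c'
      else if PySem.List.slice line (some dotPos) (some (dotPos + 2)) = ['.'] ∨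
              PySem.List.slice line (some dotPos) (some (dotPos + 2)) = ['.', ' '] then
        some (sline, scol + dotPos)
      else if PySem.List.slice line (some dotPos) (some (dotPos + 3)) = ['.', '.', '.'] then
        some (sline, scol + dotPos + 2)
      else
        pvFindDotA lines fuel sline (scol + dotPos + 1)
    else none

def find_dot_after_py (lines : List String) (sline : Int) (scol : Int) : Option (Int × Int) :=
  pvFindDotA lines (pvFuel lines) sline scol

-- ===== PORT B =====

-- port of _scan_line: structural scan of one line's characters;
-- .inl = found the dot, .inr = state (depth, in_str) at end of line
def pvLineScan (lnum : Nat) (cs : List Char) (i : Nat) (depth : Nat) (instr : Bool) :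
    ((Int × Int) ⊕ (Nat × Bool)) :=
  match cs with
  | [] => .inr (depth, instr)
  | c :: t =>
    if instr then
      pvLineScan lnum t (i+1) depth (decide (c ≠ '"'))
    else if depth > 0 then
      if c = '(' ∧ t.head? = some '*' then pvLineScan lnum t.tail (i+2) (depth+1) instr
      else if c = '*' ∧ t.head? = some ')' then pvLineScan lnum t.tail (i+2) (depth-1) instr
      else pvLineScan lnum t (i+1) depth instr
    else
      if c = '(' ∧ t.head? = some '*' then pvLineScan lnum t.tail (i+2) 1 instr
      else if c = '"' then pvLineScan lnum t (i+1) depth true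
      else if c = '.' then
        if t.head? = none ∨ t.head? = some ' ' then .inl ((lnum : Int), (i : Int))
        else if t.head? = some '.' ∧ t.tail.head? = some '.' then .inl ((lnum : Int), (i : Int) + 2)
        else pvLineScan lnum t (i+1) depth instr
      else pvLineScan lnum t (i+1) depth instr
  termination_by cs.length
  decreasing_by all_goals simp

-- port of the outer loop of B's _find_dot_after
def pvLinesB : List String → Nat → Nat → Bool → Option (Int × Int)
  | [], _, _, _ => none
  | r :: rs, lnum, depth, instr =>
    match pvLineScan lnum r.toList 0 depth instr with
    | .inl p => some p
    | .inr (d', b') => pvLinesB rs (lnum + 1) d' b'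

def find_dot_after_py_alt (lines : List String) (sline : Int) (scol : Int) : Option (Int × Int) :=
  match lines.drop sline.toNat with
  | [] => none
  | r :: rs =>
    match pvLineScan sline.toNat (r.toList.drop scol.toNat) scol.toNat 0 false with
    | .inl p => some p
    | .inr (d', b') => pvLinesB rs (sline.toNat + 1) d' b'

-- ===== PRECONDITION & SPEC =====
-- Pre_ restricts to the natural domain of cursor positions (a 0-based line and
-- column).  For negative arguments Python's negative-index/slice wraparound makes
-- A scan from the end of the buffer (and raise IndexError when sline < -len(lines)),
-- an artefact of Python indexing, not a behaviour of the function.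
def Pre_find_dot_after_py (lines : List String) (sline : Int) (scol : Int) : Prop :=
  0 ≤ sline ∧ 0 ≤ scol
instance (lines : List String) (sline : Int) (scol : Int) : Decidable (Pre_find_dot_after_py lines sline scol) := by
  unfold Pre_find_dot_after_py; infer_instance

def pvWitness_find_dot_after_py : List String × Int × Int := (["ab. cd", "(* x *) y."], 0, 1)

def Spec_find_dot_after_py (lines : List String) (sline : Int) (scol : Int) (out : Option (Int × Int)) : Prop := out = find_dot_after_py_alt lines sline scol
instance (lines : List String) (sline : Int) (scol : Int) (out : Option (Int × Int)) : Decidable (Spec_find_dot_after_py lines sline scol out) := by unfold Spec_find_dot_after_py; infer_instance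

-- ===== CLAIM (what is proved, stated in full; the proofs are below) =====
def Claim_equal_find_dot_after_py : Prop := ∀ (lines : List String) (sline : Int) (scol : Int), Dom_find_dot_after_py lines sline scol → Pre_find_dot_after_py lines sline scol → Spec_find_dot_after_py lines sline scol (find_dot_after_py lines sline scol)

-- ===== LEMMAS AND PROOFS =====

-- ---------- proof-only state abstractions ----------

def pvLineChars (lines : List String) (s : Nat) : List Char := (lines.getD s "").toList
def pvCs (lines : List String) (s c : Nat) : List Char := (pvLineChars lines s).drop c
def pvRest (lines : List String) (s : Nat) : List String := lines.drop (s+1)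

-- B's scan, resumed at line s, column c, with state (d, b)
def pvRun (lines : List String) (d : Nat) (b : Bool) (s c : Nat) : Option (Int × Int) :=
  match pvLineScan s (pvCs lines s c) c d b with
  | .inl p => some p
  | .inr (d', b') => pvLinesB (pvRest lines s) (s+1) d' b'

def pvChars (lines : List String) (s : Nat) : Nat := ((lines.drop s).map String.length).sum
-- remaining-input measure: both programs strictly decrease it at every loop step
def pvMI (lines : List String) (s c : Nat) : Nat :=
  (pvChars lines s - min c (pvLineChars lines s).length) + (lines.length - s)

-- ---------- basic list facts ----------

theorem pvCs_tail (lines : List String) (s c : Nat) :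
    pvCs lines s (c+1) = (pvCs lines s c).tail := by
  simp [pvCs, List.tail_drop]

theorem pvCs_out (lines : List String) (s c : Nat) (h : lines.length ≤ s) :
    pvCs lines s c = [] := by
  simp [pvCs, pvLineChars, List.getD_eq_getElem?_getD, List.getElem?_eq_none h]

theorem pvCs_cons_lt {lines : List String} {s c : Nat} {x : Char} {t : List Char}
    (h : pvCs lines s c = x :: t) :
    s < lines.length ∧ c + (x :: t).length = (pvLineChars lines s).length := by
  constructor
  · by_contra hs
    rw [pvCs_out lines s c (by omega)] at h
    exact absurd h (by simp)
  · have := congrArg List.length h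
    simp [pvCs] at this
    simp
    omega

theorem pvRest_getD {lines : List String} {s : Nat} {r : String} {rs : List String}
    (h : pvRest lines s = r :: rs) :
    lines[s+1]? = some r ∧ pvRest lines (s+1) = rs := by
  constructor
  · have h1 : (lines.drop (s+1)).head? = some r := by simp [pvRest] at h; simp [h]
    rw [List.head?_drop] at h1
    exact h1
  · have : pvRest lines (s+1) = (lines.drop (s+1)).tail := by
      simp [pvRest, List.tail_drop]
    rw [this]; simp [pvRest] at h; simp [h]

-- ---------- measure facts ----------

theorem pvChars_succ (lines : List String) (s : Nat) (hs : s < lines.length) :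
    pvChars lines s = (pvLineChars lines s).length + pvChars lines (s+1) := by
  obtain ⟨r, rs, h⟩ : ∃ r rs, lines.drop s = r :: rs := by
    cases hd : lines.drop s with
    | nil => exact absurd (List.drop_eq_nil_iff.mp hd) (by omega)
    | cons r rs => exact ⟨r, rs, rfl⟩
  have hget : lines[s]? = some r := by
    have h1 : (lines.drop s).head? = some r := by simp [h]
    rw [List.head?_drop] at h1
    exact h1
  have htail : lines.drop (s+1) = rs := by
    have : lines.drop (s+1) = (lines.drop s).tail := by simp [List.tail_drop]
    simp [this, h]
  simp [pvChars, h, htail, pvLineChars, List.getD_eq_getElem?_getD, hget]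

theorem pvMI_pos (lines : List String) (s c : Nat) (hs : s < lines.length) :
    1 ≤ pvMI lines s c := by
  simp [pvMI]; omega

theorem pvMI_cons {lines : List String} {s c : Nat} {x : Char} {t : List Char}
    (h : pvCs lines s c = x :: t) :
    pvMI lines s (c+1) < pvMI lines s c := by
  obtain ⟨hs, hlen⟩ := pvCs_cons_lt h
  simp only [List.length_cons] at hlen
  have hcs := pvChars_succ lines s hs
  simp only [pvMI]
  omega

theorem pvMI_cons2 {lines : List String} {s c : Nat} {x y : Char} {t : List Char}
    (h : pvCs lines s c = x :: y :: t) :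
    pvMI lines s (c+2) + 2 ≤ pvMI lines s c := by
  obtain ⟨hs, hlen⟩ := pvCs_cons_lt h
  simp only [List.length_cons] at hlen
  have hcs := pvChars_succ lines s hs
  simp only [pvMI]
  omega

theorem pvMI_nextline {lines : List String} {s c : Nat}
    (hs : s < lines.length) (h : pvCs lines s c = []) :
    pvMI lines (s+1) 0 < pvMI lines s c := by
  have hc : (pvLineChars lines s).length ≤ c := by
    by_contra hc
    have : pvCs lines s c ≠ [] := by
      simp [pvCs, List.drop_eq_nil_iff]; omega
    exact this h
  have := pvChars_succ lines s hs
  simp [pvMI]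
  omega

theorem pvChars_le (lines : List String) (s : Nat) :
    pvChars lines s ≤ (lines.map String.length).sum := by
  induction s with
  | zero => simp [pvChars]
  | succ s ih =>
    by_cases hs : s < lines.length
    · have := pvChars_succ lines s hs
      omega
    · have h1 : pvChars lines s = 0 := by
        unfold pvChars
        rw [List.drop_eq_nil_iff.mpr (by omega)]
        simp
      have h2 : pvChars lines (s+1) = 0 := by
        unfold pvChars
        rw [List.drop_eq_nil_iff.mpr (by omega)]
        simp
      omega

theorem pvMI_lt_fuel (lines : List String) (s c : Nat) :
    pvMI lines s c < pvFuel lines := by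
  have := pvChars_le lines s
  simp [pvMI, pvFuel]
  omega

-- ---------- B-side small-step lemmas ----------

theorem pvRun_none (lines : List String) (d : Nat) (b : Bool) (s c : Nat)
    (h : lines.length ≤ s) : pvRun lines d b s c = none := by
  have h1 : pvCs lines s c = [] := pvCs_out lines s c h
  have h2 : pvRest lines s = [] := by
    simp [pvRest, List.drop_eq_nil_iff]; omega
  simp [pvRun, h1, h2, pvLineScan, pvLinesB]

theorem pvRun_nextline (lines : List String) (d : Nat) (b : Bool) (s c : Nat)
    (h : pvCs lines s c = []) : pvRun lines d b s c = pvRun lines d b (s+1) 0 := by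
  cases hr : pvRest lines s with
  | nil =>
    have hlen : lines.length ≤ s + 1 := by
      have := List.drop_eq_nil_iff.mp (by simpa [pvRest] using hr)
      omega
    rw [pvRun_none lines d b (s+1) 0 hlen]
    simp [pvRun, h, hr, pvLineScan, pvLinesB]
  | cons r rs =>
    obtain ⟨hget, hrest⟩ := pvRest_getD hr
    have hcs : pvCs lines (s+1) 0 = r.toList := by
      simp [pvCs, pvLineChars, List.getD_eq_getElem?_getD, hget]
    conv_lhs => simp [pvRun, h, pvLineScan, hr, pvLinesB]
    conv_rhs => simp [pvRun, hcs, hrest]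

theorem pvRun_str (lines : List String) (d : Nat) (s c : Nat) (x : Char) (t : List Char)
    (h : pvCs lines s c = x :: t) :
    pvRun lines d true s c = pvRun lines d (decide (x ≠ '"')) s (c+1) := by
  have hc1 : pvCs lines s (c+1) = t := by rw [pvCs_tail, h]; rfl
  simp only [pvRun, h, hc1, pvLineScan]
  simp

theorem pvRun_com_open (lines : List String) (d : Nat) (s c : Nat) (t : List Char)
    (h : pvCs lines s c = '(' :: '*' :: t) (hd : 0 < d) :
    pvRun lines d false s c = pvRun lines (d+1) false s (c+2) := by
  have hc1 : pvCs lines s (c+1) = '*' :: t := by rw [pvCs_tail, h]; rfl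
  have hc2 : pvCs lines s (c+2) = t := by
    have : c + 2 = (c+1) + 1 := by omega
    rw [this, pvCs_tail, hc1]; rfl
  simp only [pvRun, h, hc2, pvLineScan]
  simp [hd]

theorem pvRun_com_close (lines : List String) (d : Nat) (s c : Nat) (t : List Char)
    (h : pvCs lines s c = '*' :: ')' :: t) (hd : 0 < d) :
    pvRun lines d false s c = pvRun lines (d-1) false s (c+2) := by
  have hc1 : pvCs lines s (c+1) = ')' :: t := by rw [pvCs_tail, h]; rfl
  have hc2 : pvCs lines s (c+2) = t := by
    have : c + 2 = (c+1) + 1 := by omega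
    rw [this, pvCs_tail, hc1]; rfl
  simp only [pvRun, h, hc2, pvLineScan]
  simp [hd]

theorem pvRun_com_other (lines : List String) (d : Nat) (s c : Nat) (x : Char) (t : List Char)
    (h : pvCs lines s c = x :: t) (hd : 0 < d)
    (h1 : ¬ (x = '(' ∧ t.head? = some '*')) (h2 : ¬ (x = '*' ∧ t.head? = some ')')) :
    pvRun lines d false s c = pvRun lines d false s (c+1) := by
  have hc1 : pvCs lines s (c+1) = t := by rw [pvCs_tail, h]; rfl
  simp only [pvRun, h, hc1, pvLineScan]
  simp [hd, h1, h2]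

theorem pvRun_code_open (lines : List String) (s c : Nat) (t : List Char)
    (h : pvCs lines s c = '(' :: '*' :: t) :
    pvRun lines 0 false s c = pvRun lines 1 false s (c+2) := by
  have hc1 : pvCs lines s (c+1) = '*' :: t := by rw [pvCs_tail, h]; rfl
  have hc2 : pvCs lines s (c+2) = t := by
    have : c + 2 = (c+1) + 1 := by omega
    rw [this, pvCs_tail, hc1]; rfl
  simp only [pvRun, h, hc2, pvLineScan]
  simp

theorem pvRun_code_str (lines : List String) (s c : Nat) (t : List Char)
    (h : pvCs lines s c = '"' :: t) :
    pvRun lines 0 false s c = pvRun lines 0 true s (c+1) := by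
  have hc1 : pvCs lines s (c+1) = t := by rw [pvCs_tail, h]; rfl
  simp only [pvRun, h, hc1, pvLineScan]
  simp

theorem pvRun_dot_end (lines : List String) (s c : Nat)
    (h : pvCs lines s c = ['.']) :
    pvRun lines 0 false s c = some ((s : Int), (c : Int)) := by
  simp [pvRun, h, pvLineScan]

theorem pvRun_dot_sp (lines : List String) (s c : Nat) (t : List Char)
    (h : pvCs lines s c = '.' :: ' ' :: t) :
    pvRun lines 0 false s c = some ((s : Int), (c : Int)) := by
  simp [pvRun, h, pvLineScan]

theorem pvRun_dot3 (lines : List String) (s c : Nat) (t : List Char)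
    (h : pvCs lines s c = '.' :: '.' :: '.' :: t) :
    pvRun lines 0 false s c = some ((s : Int), (c : Int) + 2) := by
  simp [pvRun, h, pvLineScan]

theorem pvRun_code_adv (lines : List String) (s c : Nat) (x : Char) (t : List Char)
    (h : pvCs lines s c = x :: t)
    (h1 : ¬ (x = '(' ∧ t.head? = some '*')) (h2 : x ≠ '"')
    (h3 : x = '.' → ¬ (t.head? = none ∨ t.head? = some ' ') ∧
          ¬ (t.head? = some '.' ∧ t.tail.head? = some '.')) :
    pvRun lines 0 false s c = pvRun lines 0 false s (c+1) := by
  have hc1 : pvCs lines s (c+1) = t := by rw [pvCs_tail, h]; rfl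
  by_cases hx : x = '.'
  · obtain ⟨h4, h5⟩ := h3 hx
    subst hx
    have h4' : ¬ (t = [] ∨ t.head? = some ' ') := by simpa using h4
    have h5' : ¬ (t.head? = some '.' ∧ t[1]? = some '.') := by
      simpa [← List.head?_tail] using h5
    simp only [pvRun, h, hc1, pvLineScan]
    simp [h4', h5']
  · simp only [pvRun, h, hc1, pvLineScan]
    simp [h1, h2, hx]



-- ---------- find decomposition lemmas (first-occurrence characterisation) ----------

theorem pv_find_eq (s pat : List Char) (j : Nat) (h1 : pat <+: s.drop j)
    (h2 : ∀ i < j, ¬ pat <+: s.drop i) : PySem.Chars.find s pat = (j : Int) := by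
  have hin : PySem.Chars.isIn pat s = true :=
    (PySem.Chars.exists_prefix_drop_iff_isIn pat s).mp ⟨j, h1⟩
  have h0 : 0 ≤ PySem.Chars.find s pat :=
    (PySem.Chars.find_nonneg_iff s pat).mpr ((PySem.Chars.isIn_iff_infix pat s).mp hin)
  obtain ⟨hpre, hmin⟩ := PySem.Chars.find_spec h0
  rcases lt_trichotomy (PySem.Chars.find s pat).toNat j with h | h | h
  · exact absurd hpre (h2 _ h)
  · omega
  · exact absurd h1 (hmin j h)

theorem pv_find_nil (pat : List Char) (h : pat ≠ []) : PySem.Chars.find [] pat = -1 := by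
  rw [PySem.Chars.find_eq_neg_one_iff]
  intro hinf
  exact h (List.eq_nil_of_infix_nil hinf)

theorem pv_find_pos (l pat : List Char) (h : pat <+: l) : PySem.Chars.find l pat = 0 :=
  pv_find_eq l pat 0 h (by intro i hi; omega)

theorem pv_find_shift (x : Char) (t pat : List Char) (h : ¬ pat <+: (x :: t)) :
    PySem.Chars.find (x :: t) pat =
      (if PySem.Chars.find t pat = -1 then -1 else PySem.Chars.find t pat + 1) := by
  by_cases hk : 0 ≤ PySem.Chars.find t pat
  · obtain ⟨hpre, hmin⟩ := PySem.Chars.find_spec hk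
    have heq : PySem.Chars.find (x :: t) pat = (((PySem.Chars.find t pat).toNat + 1 : Nat) : Int) := by
      apply pv_find_eq
      · simpa using hpre
      · intro i hi
        cases i with
        | zero => simpa using h
        | succ i => simpa using hmin i (by omega)
    rw [heq]
    have hne : ¬ PySem.Chars.find t pat = -1 := by omega
    simp [hne]
    omega
  · have ht : PySem.Chars.find t pat = -1 := by
      have := PySem.Chars.neg_one_le_find t pat
      omega
    rw [ht]
    norm_num
    rw [PySem.Chars.find_eq_neg_one_iff]
    intro hinf
    have hex : ∃ j, pat <+: (x :: t).drop j := by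
      rw [PySem.Chars.exists_prefix_drop_iff_isIn, PySem.Chars.isIn_iff_infix]
      exact hinf
    obtain ⟨j, hj⟩ := hex
    cases j with
    | zero => exact h (by simpa using hj)
    | succ j =>
      have hj' : pat <+: t.drop j := by simpa using hj
      have : PySem.Chars.find t pat ≠ -1 := by
        rw [PySem.Chars.find_ne_neg_one_iff, ← PySem.Chars.isIn_iff_infix,
          ← PySem.Chars.exists_prefix_drop_iff_isIn]
        exact ⟨j, hj'⟩
      omega

-- shifting a find result by one position preserves the branch tests of A
theorem pv_shift_neg1 (a : Int) (ha : -1 ≤ a) :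
    ((if a = -1 then -1 else a + 1) = -1) ↔ (a = -1) := by
  split_ifs with h
  · simp [h]
  · constructor <;> intro hc <;> omega

theorem pv_shift_cond (a b : Int) (ha : -1 ≤ a) (hb : -1 ≤ b) :
    (0 ≤ (if a = -1 then -1 else a + 1) ∧ (if a = -1 then -1 else a + 1) < (if b = -1 then -1 else b + 1))
      ↔ (0 ≤ a ∧ a < b) := by
  split_ifs <;> (constructor <;> intro hc <;> exact ⟨by omega, by omega⟩)

-- ---------- A-side step lemmas ----------

-- the `line` expression in both A loops is exactly pvCs
theorem pv_lineA (lines : List String) (s c : Nat) :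
    PySem.List.slice ((PySem.List.pyGet? lines ((s : Nat) : Int)).getD "").toList (some ((c : Nat) : Int)) none
      = pvCs lines s c := by
  rw [PySem.List.pyGet?_natCast, PySem.List.slice_from_natCast]
  simp [pvCs, pvLineChars, List.getD_eq_getElem?_getD]

theorem pvA_none (lines : List String) (s c : Nat) (f : Nat) (h : lines.length ≤ s) :
    pvFindDotA lines f (s : Int) (c : Int) = none := by
  have hs : ¬ ((s : Int) < (lines.length : Int)) := by exact_mod_cast not_lt.mpr h
  cases f with
  | zero => simp [pvFindDotA]
  | succ f => simp [pvFindDotA, hs]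


theorem pv_slice_succ (x : Char) (t : List Char) (a b : Int) (ha : 0 ≤ a) (hb : 0 ≤ b) :
    PySem.List.slice (x :: t) (some (a+1)) (some (b+1)) = PySem.List.slice t (some a) (some b) := by
  rw [PySem.List.slice_toNat _ (by omega) (by omega), PySem.List.slice_toNat _ ha hb]
  have h1 : (a+1).toNat = a.toNat + 1 := by omega
  have h2 : (b+1).toNat = b.toNat + 1 := by omega
  rw [h1, h2]
  simp

theorem pvA_nextline (lines : List String) (s c f : Nat)
    (hs : s < lines.length) (h : pvCs lines s c = []) :
    pvFindDotA lines (f+1) (s : Int) (c : Int) = pvFindDotA lines f ((s : Int)+1) 0 := by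
  have hs' : ((s : Int) < (lines.length : Int)) := by exact_mod_cast hs
  simp only [pvFindDotA, pv_lineA, h, if_pos hs',
    pv_find_nil ['.'] (by simp), pv_find_nil ['(', '*'] (by simp), pv_find_nil ['"'] (by simp)]
  norm_num

theorem pvA_shift (lines : List String) (s c : Nat) (x : Char) (t : List Char) (f : Nat)
    (hs : s < lines.length) (h : pvCs lines s c = x :: t)
    (hdot : ¬ ['.'] <+: (x :: t)) (hcom : ¬ ['(', '*'] <+: (x :: t)) (hstr : ¬ ['"'] <+: (x :: t)) :
    pvFindDotA lines (f+1) (s : Int) (c : Int) = pvFindDotA lines (f+1) (s : Int) ((c+1 : Nat) : Int) := by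
  have hc1 : pvCs lines s (c+1) = t := by rw [pvCs_tail, h]; rfl
  have hs' : ((s : Int) < (lines.length : Int)) := by exact_mod_cast hs
  have hdp := PySem.Chars.neg_one_le_find t ['.']
  have hcp := PySem.Chars.neg_one_le_find t ['(', '*']
  have hsp := PySem.Chars.neg_one_le_find t ['"']
  simp only [pvFindDotA, pv_lineA, h, hc1, if_pos hs',
    pv_find_shift x t ['.'] hdot, pv_find_shift x t ['(', '*'] hcom, pv_find_shift x t ['"'] hstr,
    pv_shift_neg1 _ hdp, pv_shift_neg1 _ hcp, pv_shift_neg1 _ hsp,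
    pv_shift_cond _ _ hcp hdp, pv_shift_cond _ _ hsp hdp, pv_shift_cond _ _ hcp hsp]
  set dp := PySem.Chars.find t ['.'] with hdp_def
  set cp := PySem.Chars.find t ['(', '*'] with hcp_def
  set sp := PySem.Chars.find t ['"'] with hsp_def
  by_cases hde : dp = -1
  · -- no dot on the rest of the line: the slice branches are unreachable
    simp only [hde, reduceIte]
    by_cases hce : cp = -1 <;> by_cases hse : sp = -1 <;>
      simp only [hce, hse, reduceIte] <;> norm_num <;>
      (try split_ifs) <;>
      (try rw [show ((c : Int) + (cp + 1) + 2) = (c : Int) + 1 + cp + 2 from by ring]) <;>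
      (try rw [show ((c : Int) + (sp + 1) + 1) = (c : Int) + 1 + sp + 1 from by ring])
  · -- a dot exists; align the slice expressions and the column arithmetic
    have hdp0 : 0 ≤ dp := by omega
    simp only [if_neg hde]
    have hsl2 : PySem.List.slice (x :: t) (some (dp + 1)) (some (dp + 1 + 2))
        = PySem.List.slice t (some dp) (some (dp + 2)) := by
      rw [show dp + 1 + 2 = (dp + 2) + 1 by ring]
      exact pv_slice_succ x t dp (dp + 2) hdp0 (by omega)
    have hsl3 : PySem.List.slice (x :: t) (some (dp + 1)) (some (dp + 1 + 3))
        = PySem.List.slice t (some dp) (some (dp + 3)) := by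
      rw [show dp + 1 + 3 = (dp + 3) + 1 by ring]
      exact pv_slice_succ x t dp (dp + 3) hdp0 (by omega)
    rw [hsl2, hsl3]
    rw [show ((c : Int) + (dp + 1)) = ((c+1 : Nat) : Int) + dp from by push_cast; ring]
    by_cases hce : cp = -1 <;> by_cases hse : sp = -1 <;> simp only [hce, hse, reduceIte] <;>
      split_ifs <;>
      (try rw [show ((c : Int) + (cp + 1) + 2) = ((c+1 : Nat) : Int) + cp + 2 from by push_cast; ring]) <;>
      (try rw [show ((c : Int) + (sp + 1) + 1) = ((c+1 : Nat) : Int) + sp + 1 from by push_cast; ring]) <;>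
      first
      | rfl
      | (exfalso; omega)
      | (exfalso; simp only [false_or, or_false, true_or, or_true, false_and, and_false, true_and, and_true, not_true, not_false_iff] at *; omega)
      | (exfalso; simp only [false_or, or_false, true_or, or_true, false_and, and_false, true_and, and_true, not_true, not_false_iff] at *)


theorem pvA_dot_end (lines : List String) (s c f : Nat)
    (hs : s < lines.length) (h : pvCs lines s c = ['.']) :
    pvFindDotA lines (f+1) (s : Int) (c : Int) = some ((s : Int), (c : Int)) := by
  have hs' : ((s : Int) < (lines.length : Int)) := by exact_mod_cast hs
  have hcp := PySem.Chars.neg_one_le_find ['.'] ['(', '*']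
  have hsp := PySem.Chars.neg_one_le_find ['.'] ['"']
  simp only [pvFindDotA, pv_lineA, h, if_pos hs', pv_find_pos ['.'] ['.'] (by simp)]
  rw [if_neg (by omega), if_neg (by omega)]
  have hsl2 : PySem.List.slice ['.'] (some 0) (some (0+2)) = ['.'] := rfl
  rw [hsl2]
  norm_num

theorem pvA_dot_sp (lines : List String) (s c f : Nat) (t : List Char)
    (hs : s < lines.length) (h : pvCs lines s c = '.' :: ' ' :: t) :
    pvFindDotA lines (f+1) (s : Int) (c : Int) = some ((s : Int), (c : Int)) := by
  have hs' : ((s : Int) < (lines.length : Int)) := by exact_mod_cast hs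
  have hcp := PySem.Chars.neg_one_le_find ('.' :: ' ' :: t) ['(', '*']
  have hsp := PySem.Chars.neg_one_le_find ('.' :: ' ' :: t) ['"']
  simp only [pvFindDotA, pv_lineA, h, if_pos hs',
    pv_find_pos ('.' :: ' ' :: t) ['.'] (by simp)]
  rw [if_neg (by omega), if_neg (by omega)]
  have hsl2 : PySem.List.slice ('.' :: ' ' :: t) (some 0) (some (0+2)) = ['.', ' '] := by
    rw [PySem.List.slice_toNat _ (by norm_num) (by norm_num)]
    rw [show Int.toNat (0+2) = 2 from rfl, show Int.toNat 0 = 0 from rfl]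
    rfl
  rw [hsl2]
  norm_num

theorem pvA_dot3 (lines : List String) (s c f : Nat) (t : List Char)
    (hs : s < lines.length) (h : pvCs lines s c = '.' :: '.' :: '.' :: t) :
    pvFindDotA lines (f+1) (s : Int) (c : Int) = some ((s : Int), (c : Int) + 2) := by
  have hs' : ((s : Int) < (lines.length : Int)) := by exact_mod_cast hs
  have hcp := PySem.Chars.neg_one_le_find ('.' :: '.' :: '.' :: t) ['(', '*']
  have hsp := PySem.Chars.neg_one_le_find ('.' :: '.' :: '.' :: t) ['"']
  simp only [pvFindDotA, pv_lineA, h, if_pos hs',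
    pv_find_pos ('.' :: '.' :: '.' :: t) ['.'] (by simp)]
  rw [if_neg (by omega), if_neg (by omega)]
  have hsl2 : PySem.List.slice ('.' :: '.' :: '.' :: t) (some 0) (some (0+2)) = ['.', '.'] := by
    rw [PySem.List.slice_toNat _ (by norm_num) (by norm_num)]
    rw [show Int.toNat (0+2) = 2 from rfl, show Int.toNat 0 = 0 from rfl]
    rfl
  have hsl3 : PySem.List.slice ('.' :: '.' :: '.' :: t) (some 0) (some (0+3)) = ['.', '.', '.'] := by
    rw [PySem.List.slice_toNat _ (by norm_num) (by norm_num)]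
    rw [show Int.toNat (0+3) = 3 from rfl, show Int.toNat 0 = 0 from rfl]
    rfl
  rw [hsl2, hsl3, if_neg (by decide), if_pos rfl]
  norm_num

theorem pvA_dot_adv (lines : List String) (s c f : Nat) (y : Char) (t : List Char)
    (hs : s < lines.length) (h : pvCs lines s c = '.' :: y :: t)
    (hy : y ≠ ' ') (hyy : ¬ (y = '.' ∧ t.head? = some '.')) :
    pvFindDotA lines (f+1) (s : Int) (c : Int) = pvFindDotA lines f (s : Int) ((c+1 : Nat) : Int) := by
  have hs' : ((s : Int) < (lines.length : Int)) := by exact_mod_cast hs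
  have hcp := PySem.Chars.neg_one_le_find ('.' :: y :: t) ['(', '*']
  have hsp := PySem.Chars.neg_one_le_find ('.' :: y :: t) ['"']
  simp only [pvFindDotA, pv_lineA, h, if_pos hs',
    pv_find_pos ('.' :: y :: t) ['.'] (by simp)]
  rw [if_neg (by omega), if_neg (by omega)]
  have hsl2 : PySem.List.slice ('.' :: y :: t) (some 0) (some (0 + 2)) = ['.', y] := by
    rw [PySem.List.slice_toNat _ (by norm_num) (by norm_num)]
    rw [show Int.toNat (0+2) = 2 from rfl, show Int.toNat 0 = 0 from rfl]
    rfl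
  have hsl3 : PySem.List.slice ('.' :: y :: t) (some 0) (some (0 + 3))
      = '.' :: y :: t.take 1 := by
    rw [PySem.List.slice_toNat _ (by norm_num) (by norm_num)]
    rw [show Int.toNat (0+3) = 3 from rfl, show Int.toNat 0 = 0 from rfl]
    rfl
  rw [hsl2, hsl3]
  have hne2 : ¬ (['.', y] = ['.'] ∨ ['.', y] = ['.', ' ']) := by simp [hy]
  have hne3 : ¬ ('.' :: y :: t.take 1 = ['.', '.', '.']) := by
    intro hc
    cases t with
    | nil => simp at hc
    | cons z t' =>
      simp at hc
      exact hyy ⟨hc.1, by simp [hc.2]⟩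
  rw [if_neg hne2, if_neg hne3]
  norm_num

theorem pvA_code_str (lines : List String) (s c f : Nat) (t : List Char)
    (hs : s < lines.length) (h : pvCs lines s c = '"' :: t) :
    pvFindDotA lines (f+1) (s : Int) (c : Int)
      = (match pvSkipBlockA lines ['"'] none (pvFuel lines) 1 (s : Int) ((c+1 : Nat) : Int) with
         | none => none
         | some (s', c') => pvFindDotA lines f s' c') := by
  have hs' : ((s : Int) < (lines.length : Int)) := by exact_mod_cast hs
  have hdt := PySem.Chars.neg_one_le_find t ['.']
  have hcp := PySem.Chars.neg_one_le_find ('"' :: t) ['(', '*']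
  simp only [pvFindDotA, pv_lineA, h, if_pos hs',
    pv_find_pos ('"' :: t) ['"'] (by simp),
    pv_find_shift '"' t ['.'] (by simp)]
  split_ifs <;>
    first
    | rw [show ((c : Int) + 0 + 1) = ((c+1 : Nat) : Int) from by push_cast; ring]
    | (exfalso; omega)
    | (exfalso; simp only [false_or, or_false, true_or, or_true, false_and, and_false, true_and, and_true, not_true, not_false_iff] at *; omega)
    | (exfalso; simp only [false_or, or_false, true_or, or_true, false_and, and_false, true_and, and_true, not_true, not_false_iff] at *)

theorem pvA_code_com (lines : List String) (s c f : Nat) (t : List Char)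
    (hs : s < lines.length) (h : pvCs lines s c = '(' :: '*' :: t) :
    pvFindDotA lines (f+1) (s : Int) (c : Int)
      = (match pvSkipBlockA lines ['*', ')'] (some ['(', '*']) (pvFuel lines) 1 (s : Int) ((c+2 : Nat) : Int) with
         | none => none
         | some (s', c') => pvFindDotA lines f s' c') := by
  have hs' : ((s : Int) < (lines.length : Int)) := by exact_mod_cast hs
  have hdt := PySem.Chars.neg_one_le_find ('*' :: t) ['.']
  have hst := PySem.Chars.neg_one_le_find ('*' :: t) ['"']
  simp only [pvFindDotA, pv_lineA, h, if_pos hs',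
    pv_find_pos ('(' :: '*' :: t) ['(', '*'] (by simp),
    pv_find_shift '(' ('*' :: t) ['.'] (by simp),
    pv_find_shift '(' ('*' :: t) ['"'] (by simp)]
  split_ifs <;>
    first
    | rw [show ((c : Int) + 0 + 2) = ((c+2 : Nat) : Int) from by push_cast; ring]
    | (exfalso; omega)
    | (exfalso; simp only [false_or, or_false, true_or, or_true, false_and, and_false, true_and, and_true, not_true, not_false_iff] at *; omega)
    | (exfalso; simp only [false_or, or_false, true_or, or_true, false_and, and_false, true_and, and_true, not_true, not_false_iff] at *)


-- ---------- skip-block (comment / string) step lemmas ----------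

theorem pvS_zero (lines : List String) (e : List Char) (ss : Option (List Char))
    (f : Nat) (a b : Int) (hf : 0 < f) :
    pvSkipBlockA lines e ss f 0 a b = some (a, b) := by
  cases f with
  | zero => omega
  | succ f => simp [pvSkipBlockA]

theorem pvS_none (lines : List String) (e : List Char) (ss : Option (List Char))
    (f : Nat) (n : Int) (hn : 0 < n) (s c : Nat) (h : lines.length ≤ s) :
    pvSkipBlockA lines e ss f n (s : Int) (c : Int) = none := by
  have hs' : ((s : Int) ≥ (lines.length : Int)) := by exact_mod_cast h
  cases f with
  | zero => simp [pvSkipBlockA]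
  | succ f => simp [pvSkipBlockA, hn, hs']

theorem pvSC_nextline (lines : List String) (s c f : Nat) (n : Int) (hn : 0 < n)
    (hs : s < lines.length) (h : pvCs lines s c = []) :
    pvSkipBlockA lines ['*', ')'] (some ['(', '*']) (f+1) n (s : Int) (c : Int)
      = pvSkipBlockA lines ['*', ')'] (some ['(', '*']) f n ((s : Int)+1) 0 := by
  have hs' : ¬ ((s : Int) ≥ (lines.length : Int)) := by
    simp; exact_mod_cast hs
  simp only [pvSkipBlockA, if_pos hn, if_neg hs', pv_lineA, h,
    pv_find_nil ['*', ')'] (by simp), pv_find_nil ['(', '*'] (by simp)]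
  norm_num

theorem pvSC_close (lines : List String) (s c f : Nat) (n : Int) (hn : 0 < n)
    (hs : s < lines.length) (t : List Char) (h : pvCs lines s c = '*' :: ')' :: t) :
    pvSkipBlockA lines ['*', ')'] (some ['(', '*']) (f+1) n (s : Int) (c : Int)
      = pvSkipBlockA lines ['*', ')'] (some ['(', '*']) f (n-1) (s : Int) ((c+2 : Nat) : Int) := by
  have hs' : ¬ ((s : Int) ≥ (lines.length : Int)) := by
    simp; exact_mod_cast hs
  have hbs := PySem.Chars.neg_one_le_find (')' :: t) ['(', '*']
  simp only [pvSkipBlockA, if_pos hn, if_neg hs', pv_lineA, h,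
    pv_find_pos ('*' :: ')' :: t) ['*', ')'] (by simp),
    pv_find_shift '*' (')' :: t) ['(', '*'] (by simp)]
  split_ifs <;>
    first
    | (exfalso; omega)
    | (exfalso; simp only [false_or, or_false, true_or, or_true, false_and, and_false, true_and, and_true, not_true, not_false_iff] at *; omega)
    | rw [show ((c : Int) + 0 + ((['*', ')'] : List Char).length : Int)) = ((c+2 : Nat) : Int) from by
        push_cast [Option.getD_some, List.length_cons, List.length_nil]; ring]
    | (exfalso; simp only [false_or, or_false, true_or, or_true, false_and, and_false, true_and, and_true, not_true, not_false_iff] at *)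

theorem pvSC_open (lines : List String) (s c f : Nat) (n : Int) (hn : 0 < n)
    (hs : s < lines.length) (t : List Char) (h : pvCs lines s c = '(' :: '*' :: t) :
    pvSkipBlockA lines ['*', ')'] (some ['(', '*']) (f+1) n (s : Int) (c : Int)
      = pvSkipBlockA lines ['*', ')'] (some ['(', '*']) f (n+1) (s : Int) ((c+2 : Nat) : Int) := by
  have hs' : ¬ ((s : Int) ≥ (lines.length : Int)) := by
    simp; exact_mod_cast hs
  have hbe := PySem.Chars.neg_one_le_find ('*' :: t) ['*', ')']
  simp only [pvSkipBlockA, if_pos hn, if_neg hs', pv_lineA, h,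
    pv_find_pos ('(' :: '*' :: t) ['(', '*'] (by simp),
    pv_find_shift '(' ('*' :: t) ['*', ')'] (by simp)]
  split_ifs <;>
    first
    | (exfalso; omega)
    | (exfalso; simp only [false_or, or_false, true_or, or_true, false_and, and_false, true_and, and_true, not_true, not_false_iff] at *; omega)
    | rw [show ((c : Int) + 0 + (((some ['(', '*'] : Option (List Char)).getD [] : List Char).length : Int)) = ((c+2 : Nat) : Int) from by
        push_cast [Option.getD_some, List.length_cons, List.length_nil]; ring]
    | (exfalso; simp only [false_or, or_false, true_or, or_true, false_and, and_false, true_and, and_true, not_true, not_false_iff] at *)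

theorem pvSC_other (lines : List String) (s c f : Nat) (n : Int) (hn : 0 < n)
    (hs : s < lines.length) (x : Char) (t : List Char) (h : pvCs lines s c = x :: t)
    (hE : ¬ ['*', ')'] <+: (x :: t)) (hS : ¬ ['(', '*'] <+: (x :: t)) :
    pvSkipBlockA lines ['*', ')'] (some ['(', '*']) (f+1) n (s : Int) (c : Int)
      = pvSkipBlockA lines ['*', ')'] (some ['(', '*']) (f+1) n (s : Int) ((c+1 : Nat) : Int) := by
  have hc1 : pvCs lines s (c+1) = t := by rw [pvCs_tail, h]; rfl
  have hs' : ¬ ((s : Int) ≥ (lines.length : Int)) := by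
    simp; exact_mod_cast hs
  have hbe := PySem.Chars.neg_one_le_find t ['*', ')']
  have hbs := PySem.Chars.neg_one_le_find t ['(', '*']
  simp only [pvSkipBlockA, if_pos hn, if_neg hs', pv_lineA, h, hc1,
    pv_find_shift x t ['*', ')'] hE, pv_find_shift x t ['(', '*'] hS,
    pv_shift_neg1 _ hbe, pv_shift_neg1 _ hbs]
  set be := PySem.Chars.find t ['*', ')'] with hbe_def
  set bs := PySem.Chars.find t ['(', '*'] with hbs_def
  by_cases h1 : be = -1 <;> by_cases h2 : bs = -1 <;> simp only [h1, h2, reduceIte] <;>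
    split_ifs <;>
    first
    | rfl
    | (exfalso; omega)
    | (exfalso; simp only [false_or, or_false, true_or, or_true, false_and, and_false, true_and, and_true, not_true, not_false_iff] at *; omega)
    | rw [show ((c : Int) + (be + 1) + ((['*', ')'] : List Char).length : Int))
          = ((c+1 : Nat) : Int) + be + ((['*', ')'] : List Char).length : Int) from by push_cast [List.length_cons, List.length_nil]; ring]
    | rw [show ((c : Int) + (bs + 1) + (((some ['(', '*'] : Option (List Char)).getD [] : List Char).length : Int))
          = ((c+1 : Nat) : Int) + bs + (((some ['(', '*'] : Option (List Char)).getD [] : List Char).length : Int) from by push_cast [List.length_cons, List.length_nil, Option.getD_some]; ring]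
    | (exfalso; simp only [false_or, or_false, true_or, or_true, false_and, and_false, true_and, and_true, not_true, not_false_iff] at *)

theorem pvSS_nextline (lines : List String) (s c f : Nat) (n : Int) (hn : 0 < n)
    (hs : s < lines.length) (h : pvCs lines s c = []) :
    pvSkipBlockA lines ['"'] none (f+1) n (s : Int) (c : Int)
      = pvSkipBlockA lines ['"'] none f n ((s : Int)+1) 0 := by
  have hs' : ¬ ((s : Int) ≥ (lines.length : Int)) := by
    simp; exact_mod_cast hs
  simp only [pvSkipBlockA, if_pos hn, if_neg hs', pv_lineA, h,
    pv_find_nil ['"'] (by simp)]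
  norm_num

theorem pvSS_close (lines : List String) (s c f : Nat) (n : Int) (hn : 0 < n)
    (hs : s < lines.length) (t : List Char) (h : pvCs lines s c = '"' :: t) :
    pvSkipBlockA lines ['"'] none (f+1) n (s : Int) (c : Int)
      = pvSkipBlockA lines ['"'] none f (n-1) (s : Int) ((c+1 : Nat) : Int) := by
  have hs' : ¬ ((s : Int) ≥ (lines.length : Int)) := by
    simp; exact_mod_cast hs
  simp only [pvSkipBlockA, if_pos hn, if_neg hs', pv_lineA, h,
    pv_find_pos ('"' :: t) ['"'] (by simp)]
  rw [if_pos (by norm_num)]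
  rw [show ((c : Int) + 0 + ((['"'] : List Char).length : Int)) = ((c+1 : Nat) : Int) from by
    push_cast [List.length_cons, List.length_nil]; ring]

theorem pvSS_other (lines : List String) (s c f : Nat) (n : Int) (hn : 0 < n)
    (hs : s < lines.length) (x : Char) (t : List Char) (h : pvCs lines s c = x :: t)
    (hx : x ≠ '"') :
    pvSkipBlockA lines ['"'] none (f+1) n (s : Int) (c : Int)
      = pvSkipBlockA lines ['"'] none (f+1) n (s : Int) ((c+1 : Nat) : Int) := by
  have hc1 : pvCs lines s (c+1) = t := by rw [pvCs_tail, h]; rfl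
  have hs' : ¬ ((s : Int) ≥ (lines.length : Int)) := by
    simp; exact_mod_cast hs
  have hbe := PySem.Chars.neg_one_le_find t ['"']
  simp only [pvSkipBlockA, if_pos hn, if_neg hs', pv_lineA, h, hc1,
    pv_find_shift x t ['"'] (by intro hp; rw [List.cons_prefix_cons] at hp; exact hx hp.1.symm),
    pv_shift_neg1 _ hbe]
  set be := PySem.Chars.find t ['"'] with hbe_def
  by_cases h1 : be = -1 <;> (try simp only [h1, reduceIte]) <;>
    split_ifs <;>
    first
    | rfl
    | (exfalso; omega)
    | (exfalso; simp only [false_or, or_false, true_or, or_true, false_and, and_false, true_and, and_true, not_true, not_false_iff] at *; omega)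
    | rw [show ((c : Int) + (be + 1) + ((['"'] : List Char).length : Int))
          = ((c+1 : Nat) : Int) + be + ((['"'] : List Char).length : Int) from by push_cast [Option.getD_some, List.length_cons, List.length_nil]; ring]
    | (exfalso; simp only [false_or, or_false, true_or, or_true, false_and, and_false, true_and, and_true, not_true, not_false_iff] at *)


-- ---------- the three loop equivalences ----------

theorem pv_prefix2 (a b x : Char) (t : List Char) :
    ([a, b] <+: x :: t) ↔ (x = a ∧ t.head? = some b) := by
  cases t with
  | nil => simp [List.cons_prefix_cons, eq_comm]
  | cons y t' => simp [List.cons_prefix_cons, eq_comm]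

theorem pvMI_zero_len {lines : List String} {s c m : Nat}
    (hm : pvMI lines s c ≤ m) (hz : m = 0) : lines.length ≤ s := by
  subst hz
  simp [pvMI] at hm
  omega

theorem pvStrSkip (lines : List String) : ∀ (m s c f : Nat),
    pvMI lines s c ≤ m → pvMI lines s c < f →
    (pvRun lines 0 true s c
      = (match pvSkipBlockA lines ['"'] none f 1 (s : Int) (c : Int) with
         | none => none
         | some p => pvRun lines 0 false p.1.toNat p.2.toNat))
    ∧ (∀ p, pvSkipBlockA lines ['"'] none f 1 (s : Int) (c : Int) = some p →
        ∃ s' c' : Nat, p = ((s' : Int), (c' : Int)) ∧ pvMI lines s' c' < pvMI lines s c) := by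
  intro m
  induction m with
  | zero =>
    intro s c f hm hf
    have hs : lines.length ≤ s := pvMI_zero_len hm rfl
    rw [pvS_none lines _ _ f 1 (by omega) s c hs]
    exact ⟨pvRun_none lines 0 true s c hs, by intro p hp; cases hp⟩
  | succ m ih =>
    intro s c f hm hf
    by_cases hs : lines.length ≤ s
    · rw [pvS_none lines _ _ f 1 (by omega) s c hs]
      exact ⟨pvRun_none lines 0 true s c hs, by intro p hp; cases hp⟩
    push Not at hs
    obtain ⟨g, rfl⟩ : ∃ g, f = g + 1 := ⟨f - 1, by have := pvMI_pos lines s c hs; omega⟩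
    cases hcs : pvCs lines s c with
    | nil =>
      have hmi := pvMI_nextline hs hcs
      rw [pvSS_nextline lines s c g 1 (by omega) hs hcs,
        show ((s : Int) + 1) = ((s+1 : Nat) : Int) from by push_cast; ring,
        show (0 : Int) = ((0 : Nat) : Int) from by simp,
        pvRun_nextline lines 0 true s c hcs]
      obtain ⟨ihA, ihB⟩ := ih (s+1) 0 g (by omega) (by omega)
      refine ⟨ihA, ?_⟩
      intro p hp
      obtain ⟨s', c', hpeq, hlt⟩ := ihB p hp
      exact ⟨s', c', hpeq, by omega⟩
    | cons x t =>
      by_cases hx : x = '"'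
      · subst hx
        have hmi := pvMI_cons hcs
        have hmi1 := pvMI_pos lines s (c+1) hs
        rw [pvSS_close lines s c g 1 (by omega) hs t hcs,
          show ((1 : Int) - 1) = 0 from by norm_num,
          pvS_zero lines _ _ g _ _ (by omega),
          pvRun_str lines 0 s c '"' t hcs,
          show (decide ('"' ≠ '"')) = false from by decide]
        constructor
        · simp
        · intro p hp; cases hp; exact ⟨s, c+1, rfl, hmi⟩
      · have hmi := pvMI_cons hcs
        rw [pvSS_other lines s c g 1 (by omega) hs x t hcs hx]
        rw [pvRun_str lines 0 s c x t hcs]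
        have hdec : (decide (x ≠ '"')) = true := by simp [hx]
        rw [hdec]
        obtain ⟨ihA, ihB⟩ := ih s (c+1) (g+1) (by omega) (by omega)
        refine ⟨ihA, ?_⟩
        intro p hp
        obtain ⟨s', c', hpeq, hlt⟩ := ihB p hp
        exact ⟨s', c', hpeq, by omega⟩

theorem pvComSkip (lines : List String) : ∀ (m s c f : Nat) (d : Nat), 1 ≤ d →
    pvMI lines s c ≤ m → pvMI lines s c < f →
    (pvRun lines d false s c
      = (match pvSkipBlockA lines ['*', ')'] (some ['(', '*']) f (d : Int) (s : Int) (c : Int) with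
         | none => none
         | some p => pvRun lines 0 false p.1.toNat p.2.toNat))
    ∧ (∀ p, pvSkipBlockA lines ['*', ')'] (some ['(', '*']) f (d : Int) (s : Int) (c : Int) = some p →
        ∃ s' c' : Nat, p = ((s' : Int), (c' : Int)) ∧ pvMI lines s' c' < pvMI lines s c) := by
  intro m
  induction m with
  | zero =>
    intro s c f d hd hm hf
    have hs : lines.length ≤ s := pvMI_zero_len hm rfl
    rw [pvS_none lines _ _ f (d : Int) (by exact_mod_cast hd) s c hs]
    exact ⟨pvRun_none lines d false s c hs, by intro p hp; cases hp⟩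
  | succ m ih =>
    intro s c f d hd hm hf
    by_cases hs : lines.length ≤ s
    · rw [pvS_none lines _ _ f (d : Int) (by exact_mod_cast hd) s c hs]
      exact ⟨pvRun_none lines d false s c hs, by intro p hp; cases hp⟩
    push Not at hs
    obtain ⟨g, rfl⟩ : ∃ g, f = g + 1 := ⟨f - 1, by have := pvMI_pos lines s c hs; omega⟩
    cases hcs : pvCs lines s c with
    | nil =>
      have hmi := pvMI_nextline hs hcs
      rw [pvSC_nextline lines s c g (d : Int) (by exact_mod_cast hd) hs hcs,
        show ((s : Int) + 1) = ((s+1 : Nat) : Int) from by push_cast; ring,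
        show (0 : Int) = ((0 : Nat) : Int) from by simp,
        pvRun_nextline lines d false s c hcs]
      obtain ⟨ihA, ihB⟩ := ih (s+1) 0 g d hd (by omega) (by omega)
      refine ⟨ihA, ?_⟩
      intro p hp
      obtain ⟨s', c', hpeq, hlt⟩ := ihB p hp
      exact ⟨s', c', hpeq, by omega⟩
    | cons x t =>
      by_cases hop : x = '(' ∧ t.head? = some '*'
      · -- nested open
        obtain ⟨rfl, hh⟩ := hop
        obtain ⟨t', rfl⟩ : ∃ t', t = '*' :: t' := by
          cases t with
          | nil => simp at hh
          | cons y t' => simp at hh; exact ⟨t', by simp [hh]⟩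
        have hmi := pvMI_cons2 hcs
        rw [pvSC_open lines s c g (d : Int) (by exact_mod_cast hd) hs t' hcs,
          show ((d : Int) + 1) = ((d+1 : Nat) : Int) from by push_cast; ring,
          pvRun_com_open lines d s c t' hcs (by omega)]
        obtain ⟨ihA, ihB⟩ := ih s (c+2) g (d+1) (by omega) (by omega) (by omega)
        refine ⟨ihA, ?_⟩
        intro p hp
        obtain ⟨s', c', hpeq, hlt⟩ := ihB p hp
        exact ⟨s', c', hpeq, by omega⟩
      · by_cases hcl : x = '*' ∧ t.head? = some ')'
        · -- close
          obtain ⟨rfl, hh⟩ := hcl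
          obtain ⟨t', rfl⟩ : ∃ t', t = ')' :: t' := by
            cases t with
            | nil => simp at hh
            | cons y t' => simp at hh; exact ⟨t', by simp [hh]⟩
          have hmi := pvMI_cons2 hcs
          rw [pvSC_close lines s c g (d : Int) (by exact_mod_cast hd) hs t' hcs,
            pvRun_com_close lines d s c t' hcs (by omega)]
          rcases Nat.lt_or_ge 1 d with hd2 | hd1
          · -- still nested
            rw [show ((d : Int) - 1) = ((d-1 : Nat) : Int) from by push_cast [hd]; ring]
            obtain ⟨ihA, ihB⟩ := ih s (c+2) g (d-1) (by omega) (by omega) (by omega)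
            refine ⟨ihA, ?_⟩
            intro p hp
            obtain ⟨s', c', hpeq, hlt⟩ := ihB p hp
            exact ⟨s', c', hpeq, by omega⟩
          · -- nesting closes: the block is done
            have hd1' : d = 1 := by omega
            subst hd1'
            norm_num
            have hmi2 := pvMI_pos lines s (c+2) hs
            rw [pvS_zero lines _ _ g _ _ (by omega)]
            norm_num
            exact ⟨rfl, ⟨s, c+2, ⟨rfl, by push_cast; ring⟩, by omega⟩⟩
        · -- ordinary character inside the comment
          have hmi := pvMI_cons hcs
          rw [pvSC_other lines s c g (d : Int) (by exact_mod_cast hd) hs x t hcs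
              (by rw [pv_prefix2]; exact hcl) (by rw [pv_prefix2]; exact hop),
            pvRun_com_other lines d s c x t hcs (by omega) hop hcl]
          obtain ⟨ihA, ihB⟩ := ih s (c+1) (g+1) d hd (by omega) (by omega)
          refine ⟨ihA, ?_⟩
          intro p hp
          obtain ⟨s', c', hpeq, hlt⟩ := ihB p hp
          exact ⟨s', c', hpeq, by omega⟩


theorem pvMain (lines : List String) : ∀ (m s c f : Nat),
    pvMI lines s c ≤ m → pvMI lines s c < f →
    pvFindDotA lines f (s : Int) (c : Int) = pvRun lines 0 false s c := by
  intro m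
  induction m with
  | zero =>
    intro s c f hm hf
    have hs := pvMI_zero_len hm rfl
    rw [pvA_none lines s c f hs, pvRun_none lines 0 false s c hs]
  | succ m ih =>
    intro s c f hm hf
    by_cases hs0 : lines.length ≤ s
    · rw [pvA_none lines s c f hs0, pvRun_none lines 0 false s c hs0]
    push Not at hs0
    obtain ⟨g, rfl⟩ : ∃ g, f = g + 1 := ⟨f - 1, by have := pvMI_pos lines s c hs0; omega⟩
    cases hcs : pvCs lines s c with
    | nil =>
      have hmi := pvMI_nextline hs0 hcs
      rw [pvA_nextline lines s c g hs0 hcs,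
        show ((s : Int) + 1) = ((s+1 : Nat) : Int) from by push_cast; ring,
        show (0 : Int) = ((0 : Nat) : Int) from by simp,
        pvRun_nextline lines 0 false s c hcs]
      exact ih (s+1) 0 g (by omega) (by omega)
    | cons x t =>
      by_cases hcom : x = '(' ∧ t.head? = some '*'
      · -- comment opens
        obtain ⟨rfl, hh⟩ := hcom
        obtain ⟨t', rfl⟩ : ∃ t', t = '*' :: t' := by
          cases t with
          | nil => simp at hh
          | cons y t' => simp at hh; exact ⟨t', by simp [hh]⟩
        have hmi := pvMI_cons2 hcs
        rw [pvA_code_com lines s c g t' hs0 hcs, pvRun_code_open lines s c t' hcs]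
        obtain ⟨hB, hP⟩ := pvComSkip lines (pvMI lines s (c+2)) s (c+2) (pvFuel lines) 1
          (by omega) le_rfl (pvMI_lt_fuel lines s (c+2))
        simp only [Nat.cast_one] at hB hP
        rw [hB]
        cases hres : pvSkipBlockA lines ['*', ')'] (some ['(', '*']) (pvFuel lines) 1
            ((s : Nat) : Int) ((c+2 : Nat) : Int) with
        | none => rfl
        | some p =>
          obtain ⟨s', c', rfl, hlt⟩ := hP p hres
          simp only [Int.toNat_natCast]
          exact ih s' c' g (by omega) (by omega)
      · by_cases hstr : x = '"'
        · -- string opens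
          subst hstr
          have hmi := pvMI_cons hcs
          rw [pvA_code_str lines s c g t hs0 hcs, pvRun_code_str lines s c t hcs]
          obtain ⟨hB, hP⟩ := pvStrSkip lines (pvMI lines s (c+1)) s (c+1) (pvFuel lines)
            le_rfl (pvMI_lt_fuel lines s (c+1))
          rw [hB]
          cases hres : pvSkipBlockA lines ['"'] none (pvFuel lines) 1
              ((s : Nat) : Int) ((c+1 : Nat) : Int) with
          | none => rfl
          | some p =>
            obtain ⟨s', c', rfl, hlt⟩ := hP p hres
            simp only [Int.toNat_natCast]
            exact ih s' c' g (by omega) (by omega)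
        · by_cases hdot : x = '.'
          · subst hdot
            cases t with
            | nil =>
              rw [pvA_dot_end lines s c g hs0 hcs, pvRun_dot_end lines s c hcs]
            | cons y t' =>
              by_cases hy : y = ' '
              · subst hy
                rw [pvA_dot_sp lines s c g t' hs0 hcs, pvRun_dot_sp lines s c t' hcs]
              · by_cases hyy : y = '.' ∧ t'.head? = some '.'
                · obtain ⟨rfl, hh⟩ := hyy
                  obtain ⟨t'', rfl⟩ : ∃ t'', t' = '.' :: t'' := by
                    cases t' with
                    | nil => simp at hh
                    | cons z t'' => simp at hh; exact ⟨t'', by simp [hh]⟩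
                  rw [pvA_dot3 lines s c g t'' hs0 hcs, pvRun_dot3 lines s c t'' hcs]
                · have hmi := pvMI_cons hcs
                  rw [pvA_dot_adv lines s c g y t' hs0 hcs hy hyy,
                    pvRun_code_adv lines s c '.' ('.' :: y :: t' ).tail hcs (by simp) (by simp)
                      (by intro _; constructor
                          · simp [hy]
                          · simpa using hyy)]
                  exact ih s (c+1) g (by omega) (by omega)
          · -- ordinary character
            have hmi := pvMI_cons hcs
            rw [pvA_shift lines s c x t g hs0 hcs
                (by simp [List.cons_prefix_cons]; intro hq; exact hdot hq.symm)
                (by rw [pv_prefix2]; exact hcom)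
                (by simp [List.cons_prefix_cons]; intro hq; exact hstr hq.symm),
              pvRun_code_adv lines s c x t hcs hcom hstr (fun hx => absurd hx hdot)]
            exact ih s (c+1) (g+1) (by omega) (by omega)

-- B's entry point is exactly pvRun at the clamped start position
theorem pvAlt_eq_run (lines : List String) (sline scol : Int) :
    find_dot_after_py_alt lines sline scol = pvRun lines 0 false sline.toNat scol.toNat := by
  cases hd : lines.drop sline.toNat with
  | nil =>
    have hlen : lines.length ≤ sline.toNat := List.drop_eq_nil_iff.mp hd
    rw [pvRun_none lines 0 false _ _ hlen]
    simp [find_dot_after_py_alt, hd]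
  | cons r rs =>
    have hget : lines[sline.toNat]? = some r := by
      have h1 : (lines.drop sline.toNat).head? = some r := by simp [hd]
      rwa [List.head?_drop] at h1
    have hcs : pvCs lines sline.toNat scol.toNat = r.toList.drop scol.toNat := by
      simp [pvCs, pvLineChars, List.getD_eq_getElem?_getD, hget]
    have hrest : pvRest lines sline.toNat = rs := by
      have : pvRest lines sline.toNat = (lines.drop sline.toNat).tail := by
        simp [pvRest, List.tail_drop]
      simp [this, hd]
    simp only [find_dot_after_py_alt, hd, pvRun, hcs, hrest]

-- ===== VERDICT (by name: the statement is the Claim_ definition above) =====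
theorem find_dot_after_py_spec : Claim_equal_find_dot_after_py := by
  unfold Claim_equal_find_dot_after_py
  intro lines sline scol _ hpre
  unfold Pre_find_dot_after_py at hpre
  obtain ⟨h1, h2⟩ := hpre
  unfold Spec_find_dot_after_py
  rw [pvAlt_eq_run]
  unfold find_dot_after_py
  have hmain := pvMain lines (pvMI lines sline.toNat scol.toNat) sline.toNat scol.toNat
    (pvFuel lines) le_rfl (pvMI_lt_fuel lines sline.toNat scol.toNat)
  rw [Int.toNat_of_nonneg h1, Int.toNat_of_nonneg h2] at hmain
  exact hmain
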